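-- pv_equiv track=rewrite | github.com/LUKASS111/Jarvis-V0.19 | scripts/coverage_analysis.py | _categorize_function
-- ===== SOURCE A (Python) =====
-- def _categorize_function(file_path, function_name):
--     """Categorize function based on file path and name"""
--     file_path_lower = file_path.lower()
--     function_lower = function_name.lower()
--
--     if 'gui' in file_path_lower or 'interface' in file_path_lower:
--         return 'GUI Components'
--     elif any(term in file_path_lower for term in ['ai', 'llm', 'model', 'chat']):
--         return 'AI Models & LLM Management'
--     elif any(term in file_path_lower for term in ['multimodal', 'process', 'upload']):
--         return 'Multimodal Processing'
--     elif any(term in file_path_lower for term in ['memory', 'database', 'crdt', 'storage']):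
--         return 'Memory Management'
--     elif any(term in file_path_lower for term in ['workflow', 'agent', 'task']):
--         return 'Agent Workflows'
--     elif any(term in file_path_lower for term in ['vector', 'search', 'semantic']):
--         return 'Vector Database'
--     elif any(term in file_path_lower for term in ['monitor', 'health', 'metrics']):
--         return 'System Monitoring'
--     elif any(term in file_path_lower for term in ['config', 'settings', 'preference']):
--         return 'Configuration & Settings'
--     elif any(term in file_path_lower for term in ['test', 'debug', 'validate']):
--         return 'Development Tools'
--     elif any(term in file_path_lower for term in ['analyze', 'report', 'dashboard']):
--         return 'Analytics & Reporting'
--     else: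
--         return 'Core System'
-- ===== SOURCE B (Python) =====
-- CATEGORIES = [
--     'GUI Components',
--     'AI Models & LLM Management',
--     'Multimodal Processing',
--     'Memory Management',
--     'Agent Workflows',
--     'Vector Database',
--     'System Monitoring',
--     'Configuration & Settings',
--     'Development Tools',
--     'Analytics & Reporting',
--     'Core System',
-- ]
--
-- PRIORITY = {
--     'gui': 0, 'interface': 0,
--     'ai': 1, 'llm': 1, 'model': 1, 'chat': 1,
--     'multimodal': 2, 'process': 2, 'upload': 2,
--     'memory': 3, 'database': 3, 'crdt': 3, 'storage': 3,
--     'workflow': 4, 'agent': 4, 'task': 4,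
--     'vector': 5, 'search': 5, 'semantic': 5,
--     'monitor': 6, 'health': 6, 'metrics': 6,
--     'config': 7, 'settings': 7, 'preference': 7,
--     'test': 8, 'debug': 8, 'validate': 8,
--     'analyze': 9, 'report': 9, 'dashboard': 9,
-- }
--
--
-- def _categorize_function(file_path, function_name):
--     """Categorize by the highest-priority (lowest-numbered) keyword that occurs
--     in the lowercased path: take the min priority over all matching keywords
--     and index the category table (10 = 'Core System' when nothing matches)."""
--     path = file_path.lower()
--     best = min((prio for kw, prio in PRIORITY.items() if kw in path), default=10)
--     return CATEGORIES[best]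
-- ===== Notes on version B (the rewrite author's own statement) =====
-- stated objective: alternative
-- what changed: B replaces A's ten-branch early-return cascade by a selection computation: a flat keyword->priority dict is scanned in full, the minimum priority among all matching keywords is taken, and that index selects the category from a table.
import Mathlib
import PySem

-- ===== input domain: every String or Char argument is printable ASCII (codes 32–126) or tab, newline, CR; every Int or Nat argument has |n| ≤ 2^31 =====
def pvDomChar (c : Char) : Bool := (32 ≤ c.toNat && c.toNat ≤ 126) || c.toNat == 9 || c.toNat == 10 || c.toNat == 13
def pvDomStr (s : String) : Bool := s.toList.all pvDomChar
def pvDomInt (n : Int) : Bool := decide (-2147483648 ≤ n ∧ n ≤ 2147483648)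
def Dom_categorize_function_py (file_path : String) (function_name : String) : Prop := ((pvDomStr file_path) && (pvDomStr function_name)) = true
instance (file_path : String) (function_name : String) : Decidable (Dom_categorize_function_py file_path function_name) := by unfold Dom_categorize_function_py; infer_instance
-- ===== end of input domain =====

-- B replaces A's if/elif cascade by a min-priority selection over a flat keyword->priority dict, indexing a category table (alternative decomposition, same cost).


-- ===== PORT A =====
-- if/elif cascade, branch for branch; `function_lower` is computed (as in A) but unused
def categorize_function_py (file_path : String) (function_name : String) : String :=
  let file_path_lower := PySem.Str.lower file_path
  let _function_lower := PySem.Str.lower function_name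
  if PySem.Str.isIn "gui" file_path_lower || PySem.Str.isIn "interface" file_path_lower then
    "GUI Components"
  else if (["ai", "llm", "model", "chat"]).any (fun term => PySem.Str.isIn term file_path_lower) then
    "AI Models & LLM Management"
  else if (["multimodal", "process", "upload"]).any (fun term => PySem.Str.isIn term file_path_lower) then
    "Multimodal Processing"
  else if (["memory", "database", "crdt", "storage"]).any (fun term => PySem.Str.isIn term file_path_lower) then
    "Memory Management"
  else if (["workflow", "agent", "task"]).any (fun term => PySem.Str.isIn term file_path_lower) then
    "Agent Workflows"
  else if (["vector", "search", "semantic"]).any (fun term => PySem.Str.isIn term file_path_lower) then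
    "Vector Database"
  else if (["monitor", "health", "metrics"]).any (fun term => PySem.Str.isIn term file_path_lower) then
    "System Monitoring"
  else if (["config", "settings", "preference"]).any (fun term => PySem.Str.isIn term file_path_lower) then
    "Configuration & Settings"
  else if (["test", "debug", "validate"]).any (fun term => PySem.Str.isIn term file_path_lower) then
    "Development Tools"
  else if (["analyze", "report", "dashboard"]).any (fun term => PySem.Str.isIn term file_path_lower) then
    "Analytics & Reporting"
  else
    "Core System"

-- ===== PORT B =====
-- B: category table indexed by priority; index 10 is the default 'Core System'
def pvCategories : List String :=
  ["GUI Components", "AI Models & LLM Management", "Multimodal Processing",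
   "Memory Management", "Agent Workflows", "Vector Database", "System Monitoring",
   "Configuration & Settings", "Development Tools", "Analytics & Reporting", "Core System"]

-- B: the flat keyword -> priority dict, in insertion order (keys are distinct)
def pvPriority : List (String × Nat) :=
  [("gui", 0), ("interface", 0),
   ("ai", 1), ("llm", 1), ("model", 1), ("chat", 1),
   ("multimodal", 2), ("process", 2), ("upload", 2),
   ("memory", 3), ("database", 3), ("crdt", 3), ("storage", 3),
   ("workflow", 4), ("agent", 4), ("task", 4),
   ("vector", 5), ("search", 5), ("semantic", 5),
   ("monitor", 6), ("health", 6), ("metrics", 6),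
   ("config", 7), ("settings", 7), ("preference", 7),
   ("test", 8), ("debug", 8), ("validate", 8),
   ("analyze", 9), ("report", 9), ("dashboard", 9)]

-- `min(gen, default=10)` over the matching priorities: fold Nat.min starting from the
-- default 10 (exact, since every priority in the dict is ≤ 10)
def categorize_function_py_alt (file_path : String) (function_name : String) : String :=
  let path := PySem.Str.lower file_path
  let best := pvPriority.foldl
    (fun acc kv => if PySem.Str.isIn kv.1 path then Nat.min acc kv.2 else acc) 10
  -- CATEGORIES[best]: best ≤ 10 always, so the in-range list index; getD's default is unreachable
  pvCategories.getD best "Core System"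

-- ===== PRECONDITION & SPEC =====
def Spec_categorize_function_py (file_path : String) (function_name : String) (out : String) : Prop := out = categorize_function_py_alt file_path function_name
instance (file_path : String) (function_name : String) (out : String) : Decidable (Spec_categorize_function_py file_path function_name out) := by unfold Spec_categorize_function_py; infer_instance

-- ===== CLAIM (what is proved, stated in full; the proofs are below) =====
def Claim_equal_categorize_function_py : Prop := ∀ (file_path : String) (function_name : String), Dom_categorize_function_py file_path function_name → Spec_categorize_function_py file_path function_name (categorize_function_py file_path function_name)

-- ===== LEMMAS AND PROOFS =====

-- folding Nat.min with a single priority i over a keyword group collapses to the group's `any`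
theorem pvGrpFold (p : String) (ks : List String) (i : Nat) (acc : Nat) :
    List.foldl (fun acc kv => if PySem.Str.isIn kv.1 p then Nat.min acc kv.2 else acc) acc
      (ks.map (fun k => (k, i)))
    = if ks.any (fun k => PySem.Str.isIn k p) then Nat.min acc i else acc := by
  induction ks generalizing acc with
  | nil => simp
  | cons k ks ih =>
    simp only [List.map_cons, List.foldl_cons, List.any_cons]
    by_cases h : PySem.Str.isIn k p = true
    · simp only [h, if_true, Bool.true_or, ih]
      by_cases hr : (ks.any (fun k => PySem.Str.isIn k p)) = true
      · simp only [hr, if_true, Nat.min_assoc, Nat.min_self]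
      · simp only [Bool.not_eq_true] at hr
        simp only [hr, Bool.false_eq_true, if_false]
    · simp only [Bool.not_eq_true] at h
      simp only [h, Bool.false_eq_true, if_false, Bool.false_or, ih]

-- the flat dict, split into its priority groups
theorem pvPriority_split :
    pvPriority =
      (["gui", "interface"].map (fun k => (k, (0 : Nat)))) ++
      (["ai", "llm", "model", "chat"].map (fun k => (k, (1 : Nat)))) ++
      (["multimodal", "process", "upload"].map (fun k => (k, (2 : Nat)))) ++
      (["memory", "database", "crdt", "storage"].map (fun k => (k, (3 : Nat)))) ++
      (["workflow", "agent", "task"].map (fun k => (k, (4 : Nat)))) ++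
      (["vector", "search", "semantic"].map (fun k => (k, (5 : Nat)))) ++
      (["monitor", "health", "metrics"].map (fun k => (k, (6 : Nat)))) ++
      (["config", "settings", "preference"].map (fun k => (k, (7 : Nat)))) ++
      (["test", "debug", "validate"].map (fun k => (k, (8 : Nat)))) ++
      (["analyze", "report", "dashboard"].map (fun k => (k, (9 : Nat)))) := rfl

-- A's cascade = table lookup at the running Nat.min, abstracted over the ten group-match booleans
theorem pvSelect (g1 g2 g3 g4 g5 g6 g7 g8 g9 g10 : Bool) :
    (if g1 then "GUI Components"
     else if g2 then "AI Models & LLM Management"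
     else if g3 then "Multimodal Processing"
     else if g4 then "Memory Management"
     else if g5 then "Agent Workflows"
     else if g6 then "Vector Database"
     else if g7 then "System Monitoring"
     else if g8 then "Configuration & Settings"
     else if g9 then "Development Tools"
     else if g10 then "Analytics & Reporting"
     else "Core System")
    = pvCategories.getD
        (let e1 := if g1 then Nat.min 10 0 else 10
         let e2 := if g2 then Nat.min e1 1 else e1
         let e3 := if g3 then Nat.min e2 2 else e2
         let e4 := if g4 then Nat.min e3 3 else e3
         let e5 := if g5 then Nat.min e4 4 else e4
         let e6 := if g6 then Nat.min e5 5 else e5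
         let e7 := if g7 then Nat.min e6 6 else e6
         let e8 := if g8 then Nat.min e7 7 else e7
         let e9 := if g9 then Nat.min e8 8 else e8
         if g10 then Nat.min e9 9 else e9) "Core System" := by
  revert g1 g2 g3 g4 g5 g6 g7 g8 g9 g10
  decide

-- ===== VERDICT (by name: the statement is the Claim_ definition above) =====
theorem categorize_function_py_spec : Claim_equal_categorize_function_py := by
  intro file_path function_name _
  unfold Spec_categorize_function_py categorize_function_py categorize_function_py_alt
  rw [pvPriority_split]
  simp only [List.foldl_append, pvGrpFold, List.any_cons, List.any_nil, Bool.or_false]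
  exact pvSelect _ _ _ _ _ _ _ _ _ _
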